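-- pv_equiv track=rewrite | github.com/cndqjacndqja/algorithm_python | 프로그래머스/level2/멀쩡한 사각형.py | solution
-- ===== SOURCE A (Python) =====
-- def solution(w, h):
--     w_data = []
--     h_data = []
--
--     for i in range(1, w+1):
--         if w % i == 0:
--             w_data.append(i)
--
--     for i in range(1, h+1):
--         if h % i == 0:
--             h_data.append(i)
--
--     data = set(w_data).intersection(h_data)
--     return w*h - (w+h-max(data))
-- ===== SOURCE B (Python) =====
-- def solution(w, h):
--     if w <= 0 or h <= 0:
--         raise ValueError("dimensions must be positive")
--     a, b = w, h
--     while b: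
--         a, b = b, a % b
--     return w*h - (w + h - a)
-- ===== Notes on version B (the rewrite author's own statement) =====
-- stated objective: faster
-- what changed: B computes gcd(w,h) with the Euclidean remainder loop instead of enumerating all divisors of w and of h and taking the max of their intersection.
import Mathlib
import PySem

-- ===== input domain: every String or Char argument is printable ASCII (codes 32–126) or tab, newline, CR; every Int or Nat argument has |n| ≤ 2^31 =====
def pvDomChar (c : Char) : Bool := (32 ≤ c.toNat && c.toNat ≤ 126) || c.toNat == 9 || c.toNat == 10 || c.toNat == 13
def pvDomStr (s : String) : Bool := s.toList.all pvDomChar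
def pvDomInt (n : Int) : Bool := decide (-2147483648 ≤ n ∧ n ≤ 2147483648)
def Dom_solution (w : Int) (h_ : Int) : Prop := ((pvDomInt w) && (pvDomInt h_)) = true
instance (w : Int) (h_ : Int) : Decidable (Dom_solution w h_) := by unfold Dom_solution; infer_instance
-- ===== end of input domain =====

-- B computes gcd(w,h) with the Euclidean remainder loop instead of enumerating all divisors (faster).

-- ===== PORT A =====
def solution (w : Int) (h_ : Int) : Int :=
  let w_data := (PySem.List.pyRange 1 (w+1) 1).foldl
    (fun acc i => if PySem.Int.mod w i == 0 then acc ++ [i] else acc) []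
  let h_data := (PySem.List.pyRange 1 (h_+1) 1).foldl
    (fun acc i => if PySem.Int.mod h_ i == 0 then acc ++ [i] else acc) []
  let data := PySem.Set.inter (PySem.Set.ofList w_data) h_data
  -- max(data): Python raises ValueError on empty data — excluded by Pre_solution
  w * h_ - (w + h_ - (PySem.List.max? data (fun x => x)).getD 0)

-- ===== PORT B =====
-- 'while b: a, b = b, a % b' — Python mod; terminates since |a % b| < |b| for b ≠ 0
def euclidLoop (a b : Int) : Int :=
  if hb : b = 0 then a else euclidLoop b (PySem.Int.mod a b)
termination_by b.natAbs
decreasing_by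
  rcases lt_or_gt_of_ne hb with hneg | hpos
  · have := PySem.Int.mod_neg_bounds a hneg; omega
  · have h1 := PySem.Int.mod_nonneg a hpos
    have h2 := PySem.Int.mod_lt a hpos; omega

def solution_alt (w : Int) (h_ : Int) : Int :=
  -- 'raise ValueError' for w ≤ 0 or h ≤ 0: excluded by Pre_solution (0 is a junk value there)
  if w ≤ 0 ∨ h_ ≤ 0 then 0
  else w * h_ - (w + h_ - euclidLoop w h_)

-- ===== PRECONDITION & SPEC =====
-- Pre_ excludes w ≤ 0 or h ≤ 0, where A raises ValueError (max of an empty set of common divisors)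
def Pre_solution (w : Int) (h_ : Int) : Prop := 1 ≤ w ∧ 1 ≤ h_
instance (w : Int) (h_ : Int) : Decidable (Pre_solution w h_) := by unfold Pre_solution; infer_instance
def pvWitness_solution : Int × Int := (4, 6)

def Spec_solution (w : Int) (h_ : Int) (out : Int) : Prop := out = solution_alt w h_
instance (w : Int) (h_ : Int) (out : Int) : Decidable (Spec_solution w h_ out) := by unfold Spec_solution; infer_instance

-- ===== CLAIM (what is proved, stated in full; the proofs are below) =====
def Claim_equal_solution : Prop := ∀ (w : Int) (h_ : Int), Dom_solution w h_ → Pre_solution w h_ → Spec_solution w h_ (solution w h_)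

-- ===== LEMMAS AND PROOFS =====

-- the Euclidean recurrence for Int.gcd
theorem gcd_emod (a b : Int) : Int.gcd b (a % b) = Int.gcd a b := by
  apply Nat.dvd_antisymm
  · apply Int.dvd_gcd
    · have h1 := Int.gcd_dvd_left b (a % b)
      have h2 := Int.gcd_dvd_right b (a % b)
      have hs := dvd_add h2 (h1.mul_right (a / b))
      rwa [Int.emod_add_mul_ediv a b] at hs
    · exact Int.gcd_dvd_left b (a % b)
  · apply Int.dvd_gcd
    · exact Int.gcd_dvd_right a b
    · have he : a % b = a - b * (a / b) := Int.emod_def a b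
      exact he ▸ dvd_sub (Int.gcd_dvd_left a b) ((Int.gcd_dvd_right a b).mul_right _)

-- the Euclidean loop computes Int.gcd on nonnegative inputs
theorem euclidLoop_eq_gcd (a b : Int) (ha : 0 ≤ a) (hb : 0 ≤ b) :
    euclidLoop a b = Int.gcd a b := by
  have H : ∀ n : Nat, ∀ a b : Int, 0 ≤ a → 0 ≤ b → b.natAbs = n → euclidLoop a b = Int.gcd a b := by
    intro n
    induction n using Nat.strong_induction_on with
    | _ n IH =>
      intro a b ha hb hn
      rw [euclidLoop]
      by_cases h0 : b = 0
      · simp [h0, Int.natAbs_of_nonneg ha]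
      · have hbpos : 0 < b := lt_of_le_of_ne hb (Ne.symm h0)
        rw [dif_neg h0, PySem.Int.mod_eq_emod_of_pos hbpos]
        have hm1 : 0 ≤ a % b := Int.emod_nonneg a h0
        have hm2 : a % b < b := Int.emod_lt_of_pos a hbpos
        rw [IH (a % b).natAbs (by omega) b (a % b) hb hm1 rfl, gcd_emod]
  exact H b.natAbs a b ha hb rfl

-- membership in A's common-divisor set
theorem mem_data_iff (w h_ x : Int) (hw : 1 ≤ w) (hh : 1 ≤ h_) :
    (x ∈ PySem.Set.inter
      (PySem.Set.ofList ((PySem.List.pyRange 1 (w+1) 1).foldl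
        (fun acc i => if PySem.Int.mod w i == 0 then acc ++ [i] else acc) []))
      ((PySem.List.pyRange 1 (h_+1) 1).foldl
        (fun acc i => if PySem.Int.mod h_ i == 0 then acc ++ [i] else acc) []))
    ↔ (1 ≤ x ∧ x ∣ w ∧ x ∣ h_) := by
  have hwd := PySem.List.foldl_append_if (fun i => PySem.Int.mod w i == 0)
    (id : Int → Int) (PySem.List.pyRange 1 (w+1) 1) []
  have hhd := PySem.List.foldl_append_if (fun i => PySem.Int.mod h_ i == 0)
    (id : Int → Int) (PySem.List.pyRange 1 (h_+1) 1) []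
  simp only [id_eq, List.map_id, List.nil_append] at hwd hhd
  rw [hwd, hhd, PySem.Set.mem_inter, PySem.Set.mem_ofList]
  simp only [List.mem_filter, PySem.List.mem_pyRange_one, beq_iff_eq,
    PySem.Int.mod_eq_zero_iff_dvd]
  constructor
  · rintro ⟨⟨⟨h1, _⟩, hd1⟩, ⟨_, hd2⟩⟩
    exact ⟨h1, hd1, hd2⟩
  · rintro ⟨h1, hd1, hd2⟩
    have hxw : x ≤ w := Int.le_of_dvd (by omega) hd1
    have hxh : x ≤ h_ := Int.le_of_dvd (by omega) hd2
    exact ⟨⟨⟨h1, by omega⟩, hd1⟩, ⟨⟨h1, by omega⟩, hd2⟩⟩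

theorem max_common_div (w h_ : Int) (hw : 1 ≤ w) (hh : 1 ≤ h_) :
    solution w h_ = w * h_ - (w + h_ - Int.gcd w h_) := by
  simp only [solution]
  set data := PySem.Set.inter
      (PySem.Set.ofList ((PySem.List.pyRange 1 (w+1) 1).foldl
        (fun acc i => if PySem.Int.mod w i == 0 then acc ++ [i] else acc) []))
      ((PySem.List.pyRange 1 (h_+1) 1).foldl
        (fun acc i => if PySem.Int.mod h_ i == 0 then acc ++ [i] else acc) []) with hdata
  have hgpos : 0 < Int.gcd w h_ := Int.gcd_pos_of_ne_zero_left h_ (by omega)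
  have hgmem : (Int.gcd w h_ : Int) ∈ data := by
    rw [hdata, mem_data_iff w h_ _ hw hh]
    exact ⟨by exact_mod_cast hgpos, Int.gcd_dvd_left w h_, Int.gcd_dvd_right w h_⟩
  obtain ⟨m, hm⟩ : ∃ m, PySem.List.max? data (fun x => x) = some m := by
    cases hmx : PySem.List.max? data (fun x => x) with
    | none =>
      rw [PySem.List.max?_eq_none_iff] at hmx
      rw [hmx] at hgmem; exact absurd hgmem (List.not_mem_nil)
    | some m => exact ⟨m, rfl⟩
  have hmmem := PySem.List.max?_mem hm
  rw [hdata, mem_data_iff w h_ _ hw hh] at hmmem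
  obtain ⟨hm1, hmw, hmh⟩ := hmmem
  have hmg : m ≤ Int.gcd w h_ := by
    have : m.natAbs ∣ Int.gcd w h_ := by
      apply Int.dvd_gcd
      · rwa [Int.natAbs_of_nonneg (by omega : (0:Int) ≤ m)]
      · rwa [Int.natAbs_of_nonneg (by omega : (0:Int) ≤ m)]
    have hd : (m.natAbs : Int) ∣ (Int.gcd w h_ : Int) := Int.natCast_dvd_natCast.mpr this
    rw [Int.natAbs_of_nonneg (by omega : (0:Int) ≤ m)] at hd
    exact Int.le_of_dvd (by exact_mod_cast hgpos) hd
  have hgm : (Int.gcd w h_ : Int) ≤ m := PySem.List.max?_isMax hm _ hgmem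
  have : m = (Int.gcd w h_ : Int) := le_antisymm hmg hgm
  rw [hm]; simp [this]

-- ===== VERDICT (by name: the statement is the Claim_ definition above) =====
theorem solution_spec : Claim_equal_solution := by
  intro w h_ _hd hpre
  obtain ⟨hw, hh⟩ := hpre
  unfold Spec_solution solution_alt
  rw [if_neg (by omega), max_common_div w h_ hw hh, euclidLoop_eq_gcd w h_ (by omega) (by omega)]
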